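-- pv_equiv track=rewrite | github.com/corbsmaster/Tetris | tetris.py | cgrid
-- ===== SOURCE A (Python) =====
-- config={'sheight':800,'swidth':700,'gheight':20,'gwidth':10, 'block_size':30}
--
-- def cgrid(stoned):
--     grid=[[8 for x in range(config['gwidth'])]for y in range(config['gheight'])] #create Matrix
--
--     for i in range(config['gheight']): #check if gridpos is occupied
--         for j in range(config['gwidth']):
--             if (i,j) in stoned:
--                 color=stoned[(i,j)]
--                 grid[i][j]=color
--     return grid
-- ===== SOURCE B (Python) =====
-- config={'sheight':800,'swidth':700,'gheight':20,'gwidth':10, 'block_size':30}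
--
-- def cgrid(stoned):
--     grid = [[8] * config['gwidth'] for _ in range(config['gheight'])]
--     for (i, j), color in stoned.items():
--         if 0 <= i < config['gheight'] and 0 <= j < config['gwidth']:
--             grid[i][j] = color
--     return grid
-- ===== Notes on version B (the rewrite author's own statement) =====
-- stated objective: idiomatic
-- what changed: B builds the 8-filled grid once and then iterates only the occupied-cell dict entries (with a bounds guard), instead of probing the dict for every one of the 200 grid cells; Pre_ excludes association lists with duplicate (i,j) keys, which cannot arise from a Python dict and on which first-vs-last-match order is accidental.
import Mathlib
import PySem

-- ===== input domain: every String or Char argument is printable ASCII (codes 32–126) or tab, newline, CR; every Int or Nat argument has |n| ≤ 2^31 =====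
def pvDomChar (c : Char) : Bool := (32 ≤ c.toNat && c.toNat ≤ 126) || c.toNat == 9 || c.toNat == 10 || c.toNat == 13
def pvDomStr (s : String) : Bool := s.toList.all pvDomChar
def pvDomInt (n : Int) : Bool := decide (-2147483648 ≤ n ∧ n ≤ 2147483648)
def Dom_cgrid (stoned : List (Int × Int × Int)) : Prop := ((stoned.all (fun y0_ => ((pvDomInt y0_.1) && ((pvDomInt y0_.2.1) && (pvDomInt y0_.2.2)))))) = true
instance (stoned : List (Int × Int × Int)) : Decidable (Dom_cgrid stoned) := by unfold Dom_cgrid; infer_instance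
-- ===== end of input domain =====

-- B builds the grid of 8s once and then overlays only the occupied-cell entries (sparse pass with a
-- bounds guard) instead of probing the dict for each of the 200 grid cells; equivalence is proved on
-- association lists with distinct (i, j) keys (the only lists a Python dict can denote).

-- ===== PORT A =====
def cgrid (stoned : List (Int × Int × Int)) : List (List Int) :=
  let grid := (PySem.List.pyRange 0 20 1).map (fun _ => (PySem.List.pyRange 0 10 1).map (fun _ => (8 : Int)))
  (PySem.List.pyRange 0 20 1).foldl (fun g i =>
    (PySem.List.pyRange 0 10 1).foldl (fun g j =>
      match stoned.find? (fun e => e.1 == i && e.2.1 == j) with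
      | some e => g.modify i.toNat (fun row => row.set j.toNat e.2.2)
      | none => g) g) grid

-- ===== PORT B =====
def cgrid_alt (stoned : List (Int × Int × Int)) : List (List Int) :=
  let grid := (PySem.List.pyRange 0 20 1).map (fun _ => List.replicate 10 (8 : Int))
  stoned.foldl (fun g e =>
    if 0 ≤ e.1 ∧ e.1 < 20 ∧ 0 ≤ e.2.1 ∧ e.2.1 < 10 then
      g.modify e.1.toNat (fun row => row.set e.2.1.toNat e.2.2)
    else g) grid

-- ===== PRECONDITION & SPEC =====
-- Pre_ excludes association lists with duplicate (i, j) keys: they cannot arise from a Python dict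
-- (the argument's type), and on them first-match vs last-match order is accidental.
def Pre_cgrid (stoned : List (Int × Int × Int)) : Prop :=
  (stoned.map (fun e => (e.1, e.2.1))).Nodup
instance (stoned : List (Int × Int × Int)) : Decidable (Pre_cgrid stoned) := by
  unfold Pre_cgrid; infer_instance

def pvWitness_cgrid : (List (Int × Int × Int)) := [(0, 0, 5), (19, 9, 7), (3, 4, 2), (-1, 3, 6), (3, 11, 1)]

def Spec_cgrid (stoned : List (Int × Int × Int)) (out : List (List Int)) : Prop := out = cgrid_alt stoned
instance (stoned : List (Int × Int × Int)) (out : List (List Int)) : Decidable (Spec_cgrid stoned out) := by unfold Spec_cgrid; infer_instance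

-- ===== CLAIM (what is proved, stated in full; the proofs are below) =====
def Claim_equal_cgrid : Prop := ∀ (stoned : List (Int × Int × Int)), Dom_cgrid stoned → Pre_cgrid stoned → Spec_cgrid stoned (cgrid stoned)

-- ===== LEMMAS AND PROOFS =====

-- value B's overlay leaves in cell (n, m): last matching entry if any (as an Option), threaded accumulator
def lastv (s : List (Int × Int × Int)) (n m : Nat) (init : Option Int) : Option Int :=
  s.foldl (fun acc e => if e.1 = ((n : Nat) : Int) ∧ e.2.1 = ((m : Nat) : Int) then some e.2.2 else acc) init

-- the row-level fold A's inner loop performs on row i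
def rowF (s : List (Int × Int × Int)) (i : Int) (js : List Int) (row : List Int) : List Int :=
  js.foldl (fun row j =>
    match s.find? (fun e => e.1 == i && e.2.1 == j) with
    | some e => row.set j.toNat e.2.2
    | none => row) row

lemma rowF_length (s : List (Int × Int × Int)) (i : Int) (js : List Int) (row : List Int) :
    (rowF s i js row).length = row.length := by
  induction js generalizing row with
  | nil => rfl
  | cons j js ih =>
    simp only [rowF, List.foldl_cons] at *
    rw [ih]
    cases s.find? (fun e => e.1 == i && e.2.1 == j) <;> simp

lemma innerA_getElem_ne (s : List (Int × Int × Int)) (i : Int) (js : List Int)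
    (g : List (List Int)) (n : Nat) (hi : 0 ≤ i) (hne : ((n : Nat) : Int) ≠ i) :
    (js.foldl (fun g j =>
      match s.find? (fun e => e.1 == i && e.2.1 == j) with
      | some e => g.modify i.toNat (fun row => row.set j.toNat e.2.2)
      | none => g) g)[n]? = g[n]? := by
  induction js generalizing g with
  | nil => rfl
  | cons j js ih =>
    simp only [List.foldl_cons]
    rw [ih]
    cases s.find? (fun e => e.1 == i && e.2.1 == j) with
    | none => rfl
    | some e =>
      rw [List.getElem?_modify]
      have : i.toNat ≠ n := by omega
      cases g[n]? <;> simp [this]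

lemma innerA_getElem_self (s : List (Int × Int × Int)) (i : Int) (js : List Int)
    (g : List (List Int)) :
    (js.foldl (fun g j =>
      match s.find? (fun e => e.1 == i && e.2.1 == j) with
      | some e => g.modify i.toNat (fun row => row.set j.toNat e.2.2)
      | none => g) g)[i.toNat]? = (g[i.toNat]?).map (rowF s i js) := by
  induction js generalizing g with
  | nil => cases h : g[i.toNat]? <;> simp [rowF, h]
  | cons j js ih =>
    simp only [List.foldl_cons]
    rw [ih]
    have hstep : (match s.find? (fun e => e.1 == i && e.2.1 == j) with
        | some e => g.modify i.toNat (fun row => row.set j.toNat e.2.2)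
        | none => g)[i.toNat]? =
        (g[i.toNat]?).map (fun row =>
          match s.find? (fun e => e.1 == i && e.2.1 == j) with
          | some e => row.set j.toNat e.2.2
          | none => row) := by
      cases s.find? (fun e => e.1 == i && e.2.1 == j) with
      | none => cases g[i.toNat]? <;> simp
      | some e =>
        rw [List.getElem?_modify]
        cases g[i.toNat]? <;> simp
    rw [hstep, Option.map_map]
    cases h : g[i.toNat]? with
    | none => rfl
    | some row => simp [rowF, Function.comp]

lemma outerA (s : List (Int × Int × Int)) (is : List Int) (g : List (List Int)) (n : Nat)
    (hnd : is.Nodup) (hpos : ∀ i ∈ is, 0 ≤ i) :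
    (is.foldl (fun g i =>
      (PySem.List.pyRange 0 10 1).foldl (fun g j =>
        match s.find? (fun e => e.1 == i && e.2.1 == j) with
        | some e => g.modify i.toNat (fun row => row.set j.toNat e.2.2)
        | none => g) g) g)[n]? =
    if ((n : Nat) : Int) ∈ is then (g[n]?).map (rowF s ((n : Nat) : Int) (PySem.List.pyRange 0 10 1))
    else g[n]? := by
  induction is generalizing g with
  | nil => simp
  | cons i is ih =>
    simp only [List.foldl_cons]
    have hi : 0 ≤ i := hpos i (by simp)
    by_cases hcase : ((n : Nat) : Int) = i
    · have hnotmem : ((n : Nat) : Int) ∉ is := by rw [hcase]; exact (List.nodup_cons.mp hnd).1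
      rw [ih _ (List.nodup_cons.mp hnd).2 (fun x hx => hpos x (List.mem_cons_of_mem _ hx)), if_neg hnotmem]
      have htn : i.toNat = n := by omega
      rw [← htn, innerA_getElem_self, htn, ← hcase]
      simp
    · rw [ih _ (List.nodup_cons.mp hnd).2 (fun x hx => hpos x (List.mem_cons_of_mem _ hx))]
      rw [innerA_getElem_ne s i _ g n hi hcase]
      simp [List.mem_cons, hcase]

lemma rowF_getElem (s : List (Int × Int × Int)) (i : Int) (js : List Int) (row : List Int)
    (m : Nat) (hnd : js.Nodup) (hb : ∀ j ∈ js, 0 ≤ j) :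
    (rowF s i js row)[m]? =
    if ((m : Nat) : Int) ∈ js then
      (match s.find? (fun e => e.1 == i && e.2.1 == ((m : Nat) : Int)) with
       | some e => if m < row.length then some e.2.2 else none
       | none => row[m]?)
    else row[m]? := by
  induction js generalizing row with
  | nil => simp [rowF]
  | cons j js ih =>
    have hj : 0 ≤ j := hb j (by simp)
    simp only [rowF, List.foldl_cons] at *
    have hlen : (match s.find? (fun e : Int × Int × Int => e.1 == i && e.2.1 == j) with
        | some e => row.set j.toNat e.2.2
        | none => row).length = row.length := by
      cases s.find? (fun e => e.1 == i && e.2.1 == j) <;> simp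
    by_cases hcase : ((m : Nat) : Int) = j
    · have hnotmem : ((m : Nat) : Int) ∉ js := by rw [hcase]; exact (List.nodup_cons.mp hnd).1
      rw [ih _ (List.nodup_cons.mp hnd).2 (fun x hx => hb x (List.mem_cons_of_mem _ hx)), if_neg hnotmem]
      have htn : j.toNat = m := by omega
      rw [← hcase]
      cases s.find? (fun e => e.1 == i && e.2.1 == ((m : Nat) : Int)) with
      | none => simp
      | some e => simp [List.getElem?_set, Int.toNat_natCast]
    · rw [ih _ (List.nodup_cons.mp hnd).2 (fun x hx => hb x (List.mem_cons_of_mem _ hx))]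
      have hset : (match s.find? (fun e : Int × Int × Int => e.1 == i && e.2.1 == j) with
          | some e => row.set j.toNat e.2.2
          | none => row)[m]? = row[m]? := by
        cases s.find? (fun e => e.1 == i && e.2.1 == j) with
        | none => rfl
        | some e =>
          rw [List.getElem?_set]
          have : j.toNat ≠ m := by omega
          simp [this]
      rw [hlen, hset]
      simp [List.mem_cons, hcase]

-- ===== B-side lemmas =====

def stepB (g : List (List Int)) (e : Int × Int × Int) : List (List Int) :=
  if 0 ≤ e.1 ∧ e.1 < 20 ∧ 0 ≤ e.2.1 ∧ e.2.1 < 10 then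
    g.modify e.1.toNat (fun row => row.set e.2.1.toNat e.2.2)
  else g

lemma stepB_length (g : List (List Int)) (e : Int × Int × Int) : (stepB g e).length = g.length := by
  unfold stepB; split <;> simp

lemma stepB_rowlen (g : List (List Int)) (e : Int × Int × Int) (n : Nat) :
    ((stepB g e)[n]?).map List.length = (g[n]?).map List.length := by
  unfold stepB
  split
  · rw [List.getElem?_modify]
    cases g[n]? with
    | none => rfl
    | some row => by_cases h : e.1.toNat = n <;> simp [h]
  · rfl

lemma overlay_length (s : List (Int × Int × Int)) (g : List (List Int)) :
    (s.foldl stepB g).length = g.length := by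
  induction s generalizing g with
  | nil => rfl
  | cons e s ih => rw [List.foldl_cons, ih, stepB_length]

lemma overlay_rowlen (s : List (Int × Int × Int)) (g : List (List Int)) (n : Nat) :
    ((s.foldl stepB g)[n]?).map List.length = (g[n]?).map List.length := by
  induction s generalizing g with
  | nil => rfl
  | cons e s ih => rw [List.foldl_cons, ih, stepB_rowlen]

lemma lastv_init (s : List (Int × Int × Int)) (n m : Nat) (init : Option Int) :
    lastv s n m init = (lastv s n m none).or init := by
  induction s generalizing init with
  | nil => simp [lastv]
  | cons e s ih =>
    simp only [lastv, List.foldl_cons] at *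
    by_cases hp : (e.1 = ((n : Nat) : Int) ∧ e.2.1 = ((m : Nat) : Int))
    · rw [if_pos hp, if_pos hp, ih (some e.2.2)]
      cases h : List.foldl (fun acc e => if e.1 = ((n : Nat) : Int) ∧ e.2.1 = ((m : Nat) : Int) then some e.2.2 else acc) none s <;> simp [Option.or]
    · rw [if_neg hp, if_neg hp, ih]

lemma cellB (s : List (Int × Int × Int)) (g : List (List Int)) (n m : Nat)
    (hn : n < 20) (hm : m < 10) (hrow : (g[n]?).map List.length = some 10) :
    ((s.foldl stepB g)[n]?).bind (fun r => r[m]?) =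
    (lastv s n m none).or ((g[n]?).bind (fun r => r[m]?)) := by
  induction s generalizing g with
  | nil => simp [lastv, Option.none_or]
  | cons e s ih =>
    obtain ⟨row, hg, hrlen⟩ : ∃ row, g[n]? = some row ∧ row.length = 10 := by
      cases h : g[n]? with
      | none => rw [h] at hrow; simp at hrow
      | some r => rw [h] at hrow; simp at hrow; exact ⟨r, rfl, hrow⟩
    rw [List.foldl_cons]
    have hrow' : ((stepB g e)[n]?).map List.length = some 10 := by rw [stepB_rowlen, hrow]
    rw [ih _ hrow']
    have hcell : ((stepB g e)[n]?).bind (fun r => r[m]?) =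
        if e.1 = ((n : Nat) : Int) ∧ e.2.1 = ((m : Nat) : Int) then some e.2.2
        else ((g[n]?).bind (fun r => r[m]?)) := by
      unfold stepB
      by_cases hp : e.1 = ((n : Nat) : Int) ∧ e.2.1 = ((m : Nat) : Int)
      · have hguard : 0 ≤ e.1 ∧ e.1 < 20 ∧ 0 ≤ e.2.1 ∧ e.2.1 < 10 := by
          obtain ⟨h1, h2⟩ := hp; constructor; omega; constructor; omega; constructor; omega; omega
        rw [if_pos hguard, if_pos hp, List.getElem?_modify, hg]
        have h1 : e.1.toNat = n := by obtain ⟨h1, _⟩ := hp; omega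
        have h2 : e.2.1.toNat = m := by obtain ⟨_, h2⟩ := hp; omega
        simp [h1, h2, hrlen, hm]
      · split
        · rw [List.getElem?_modify, hg]
          by_cases h1 : e.1.toNat = n
          · have h2 : e.2.1.toNat ≠ m := by
              rename_i hguard
              intro hc
              exact hp ⟨by omega, by omega⟩
            simp [h1, h2]
          · simp [h1]
        · rfl
    rw [hcell]
    have : lastv (e :: s) n m none = (lastv s n m none).or
        (if e.1 = ((n : Nat) : Int) ∧ e.2.1 = ((m : Nat) : Int) then some e.2.2 else none) := by
      simp only [lastv, List.foldl_cons]
      exact lastv_init s n m _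
    rw [this, hg]
    cases lastv s n m none <;> split <;> simp [Option.or]

lemma lastv_none_of_no_match (s : List (Int × Int × Int)) (n m : Nat) (init : Option Int)
    (h : ∀ x ∈ s, ¬(x.1 = ((n : Nat) : Int) ∧ x.2.1 = ((m : Nat) : Int))) :
    lastv s n m init = init := by
  induction s generalizing init with
  | nil => rfl
  | cons e s ih =>
    simp only [lastv, List.foldl_cons] at *
    rw [if_neg (h e (by simp))]
    exact ih _ (fun x hx => h x (List.mem_cons_of_mem _ hx))

lemma find_eq_lastv (s : List (Int × Int × Int))
    (h : (s.map (fun e => (e.1, e.2.1))).Nodup) (n m : Nat) :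
    (s.find? (fun e => e.1 == ((n : Nat) : Int) && e.2.1 == ((m : Nat) : Int))).map (fun e => e.2.2)
      = lastv s n m none := by
  induction s with
  | nil => rfl
  | cons e s ih =>
    rw [List.map_cons, List.nodup_cons] at h
    have hlv : lastv (e :: s) n m none = (lastv s n m none).or
        (if e.1 = ((n : Nat) : Int) ∧ e.2.1 = ((m : Nat) : Int) then some e.2.2 else none) := by
      simp only [lastv, List.foldl_cons]
      exact lastv_init s n m _
    by_cases hp : e.1 = ((n : Nat) : Int) ∧ e.2.1 = ((m : Nat) : Int)
    · have hfind : (e :: s).find? (fun e => e.1 == ((n : Nat) : Int) && e.2.1 == ((m : Nat) : Int)) = some e := by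
        rw [List.find?_cons_of_pos]
        simp [hp.1, hp.2]
      have hnone : lastv s n m none = none := by
        apply lastv_none_of_no_match
        intro x hx hc
        exact h.1 (by
          rw [hp.1, hp.2, ← hc.1, ← hc.2]
          exact List.mem_map_of_mem hx)
      rw [hfind, hlv, hnone, if_pos hp]
      rfl
    · have hfind : (e :: s).find? (fun e => e.1 == ((n : Nat) : Int) && e.2.1 == ((m : Nat) : Int)) =
          s.find? (fun e => e.1 == ((n : Nat) : Int) && e.2.1 == ((m : Nat) : Int)) := by
        rw [List.find?_cons_of_neg]
        simp only [Bool.and_eq_true, beq_iff_eq]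
        exact fun hc => hp hc
      rw [hfind, hlv, if_neg hp, Option.or_none, ih h.2]

-- ===== VERDICT (by name: the statement is the Claim_ definition above) =====
theorem cgrid_spec : Claim_equal_cgrid := by
  intro stoned _ hpre
  unfold Spec_cgrid cgrid cgrid_alt
  simp only []
  apply List.ext_getElem?
  intro n
  by_cases hn : n < 20
  · -- A side
    have hA := outerA stoned (PySem.List.pyRange 0 20 1)
        ((PySem.List.pyRange 0 20 1).map (fun _ => (PySem.List.pyRange 0 10 1).map (fun _ => (8 : Int))))
        n (PySem.List.nodup_pyRange_one 0 20)
        (fun i hi => (PySem.List.mem_pyRange_one.mp hi).1)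
    have hmem : ((n : Nat) : Int) ∈ PySem.List.pyRange 0 20 1 := by
      rw [PySem.List.mem_pyRange_one]; constructor <;> omega
    rw [hA, if_pos hmem]
    have hg0 : (((PySem.List.pyRange 0 20 1).map (fun _ => (PySem.List.pyRange 0 10 1).map (fun _ => (8 : Int))))[n]?) =
        some ((PySem.List.pyRange 0 10 1).map (fun _ => (8 : Int))) := by
      rw [List.getElem?_map, List.getElem?_eq_getElem (by rw [PySem.List.length_pyRange_one]; omega)]
      rfl
    -- B side
    have hg0B : (((PySem.List.pyRange 0 20 1).map (fun _ => List.replicate 10 (8 : Int)))[n]?) =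
        some (List.replicate 10 (8 : Int)) := by
      rw [List.getElem?_map, List.getElem?_eq_getElem (by rw [PySem.List.length_pyRange_one]; omega)]
      rfl
    have hrowlenB := overlay_rowlen stoned ((PySem.List.pyRange 0 20 1).map (fun _ => List.replicate 10 (8 : Int))) n
    rw [hg0B] at hrowlenB
    simp only [Option.map_some, List.length_replicate] at hrowlenB
    obtain ⟨rB, hrB, hrBlen⟩ : ∃ r, (stoned.foldl stepB ((PySem.List.pyRange 0 20 1).map (fun _ => List.replicate 10 (8 : Int))))[n]? = some r ∧ r.length = 10 := by
      cases h : (stoned.foldl stepB _)[n]? with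
      | none => rw [h] at hrowlenB; simp at hrowlenB
      | some r => rw [h] at hrowlenB; simp at hrowlenB; exact ⟨r, rfl, hrowlenB⟩
    have hfoldeq : (stoned.foldl (fun g e =>
        if 0 ≤ e.1 ∧ e.1 < 20 ∧ 0 ≤ e.2.1 ∧ e.2.1 < 10 then
          g.modify e.1.toNat (fun row => row.set e.2.1.toNat e.2.2)
        else g) ((PySem.List.pyRange 0 20 1).map (fun _ => List.replicate 10 (8 : Int))))
        = stoned.foldl stepB ((PySem.List.pyRange 0 20 1).map (fun _ => List.replicate 10 (8 : Int))) := rfl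
    rw [hfoldeq, hrB, hg0, Option.map_some]
    congr 1
    -- rows equal
    apply List.ext_getElem?
    intro m
    by_cases hm : m < 10
    · have hrA := rowF_getElem stoned ((n : Nat) : Int) (PySem.List.pyRange 0 10 1)
        ((PySem.List.pyRange 0 10 1).map (fun _ => (8 : Int))) m
        (PySem.List.nodup_pyRange_one 0 10) (fun j hj => (PySem.List.mem_pyRange_one.mp hj).1)
      have hmemm : ((m : Nat) : Int) ∈ PySem.List.pyRange 0 10 1 := by
        rw [PySem.List.mem_pyRange_one]; constructor <;> omega
      rw [hrA, if_pos hmemm]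
      have hcell := cellB stoned ((PySem.List.pyRange 0 20 1).map (fun _ => List.replicate 10 (8 : Int))) n m hn hm (by rw [hg0B]; simp)
      rw [hrB, hg0B] at hcell
      simp only [Option.bind_some] at hcell
      have h8 : (List.replicate 10 (8 : Int))[m]? = some 8 := by
        rw [List.getElem?_replicate]; simp [hm]
      rw [h8] at hcell
      have hrow8 : ((PySem.List.pyRange 0 10 1).map (fun _ => (8 : Int)))[m]? = some 8 := by
        rw [List.getElem?_map, List.getElem?_eq_getElem (by rw [PySem.List.length_pyRange_one]; omega)]
        rfl
      have hlen8 : ((PySem.List.pyRange 0 10 1).map (fun _ => (8 : Int))).length = 10 := by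
        rw [List.length_map, PySem.List.length_pyRange_one]
        decide
      have hfl := find_eq_lastv stoned hpre n m
      rw [hcell, ← hfl]
      cases hfind : stoned.find? (fun e => e.1 == ((n : Nat) : Int) && e.2.1 == ((m : Nat) : Int)) with
      | none => exact hrow8
      | some e =>
        show (if m < ((PySem.List.pyRange 0 10 1).map (fun _ => (8 : Int))).length then some e.2.2 else none)
            = Option.or (some e.2.2) (some 8)
        rw [hlen8, if_pos hm]
        rfl
    · -- m ≥ 10: both none
      have hlenA : (rowF stoned ((n : Nat) : Int) (PySem.List.pyRange 0 10 1)
          ((PySem.List.pyRange 0 10 1).map (fun _ => (8 : Int)))).length = 10 := by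
        rw [rowF_length, List.length_map, PySem.List.length_pyRange_one]
        decide
      rw [List.getElem?_eq_none (by rw [hlenA]; omega), List.getElem?_eq_none (by rw [hrBlen]; omega)]
  · -- n ≥ 20: both none
    have hlenB : (stoned.foldl stepB ((PySem.List.pyRange 0 20 1).map (fun _ => List.replicate 10 (8 : Int)))).length = 20 := by
      rw [overlay_length, List.length_map, PySem.List.length_pyRange_one]
      decide
    have hA := outerA stoned (PySem.List.pyRange 0 20 1)
        ((PySem.List.pyRange 0 20 1).map (fun _ => (PySem.List.pyRange 0 10 1).map (fun _ => (8 : Int))))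
        n (PySem.List.nodup_pyRange_one 0 20)
        (fun i hi => (PySem.List.mem_pyRange_one.mp hi).1)
    have hnotmem : ((n : Nat) : Int) ∉ PySem.List.pyRange 0 20 1 := by
      rw [PySem.List.mem_pyRange_one]; omega
    rw [hA, if_neg hnotmem]
    rw [List.getElem?_eq_none (by rw [List.length_map, PySem.List.length_pyRange_one]; omega)]
    symm
    apply List.getElem?_eq_none
    show (stoned.foldl stepB ((PySem.List.pyRange 0 20 1).map (fun _ => List.replicate 10 (8 : Int)))).length ≤ n
    rw [hlenB]
    omega
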